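-- pv_equiv track=rewrite | github.com/cda1234567/shipping-scheduler | app/services/main_preview.py | _count_decimal_places
-- ===== SOURCE A (Python) =====
-- def _count_decimal_places(format_code: str) -> int | None:
--     if "." not in format_code:
--         return 0 if "0" in format_code else None
--
--     decimals = 0
--     started = False
--     for char in format_code.split(".", 1)[1]:
--         if char in {"0", "#"}:
--             decimals += 1
--             started = True
--             continue
--         if started:
--             break
--     return decimals
-- ===== SOURCE B (Python) =====
-- def _count_decimal_places(format_code: str) -> int | None:
--     if "." not in format_code:
--         return 0 if "0" in format_code else None
--     part = format_code.split(".", 1)[1]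
--     runs = "".join(c if c in "0#" else " " for c in part).split()
--     return len(runs[0]) if runs else 0
-- ===== Notes on version B (the rewrite author's own statement) =====
-- stated objective: idiomatic
-- what changed: Replaces A's imperative skip-then-count state machine (decimals/started flags with continue/break) by masking non-placeholder characters to spaces, whitespace-splitting, and taking the length of the first token.
import Mathlib
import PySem

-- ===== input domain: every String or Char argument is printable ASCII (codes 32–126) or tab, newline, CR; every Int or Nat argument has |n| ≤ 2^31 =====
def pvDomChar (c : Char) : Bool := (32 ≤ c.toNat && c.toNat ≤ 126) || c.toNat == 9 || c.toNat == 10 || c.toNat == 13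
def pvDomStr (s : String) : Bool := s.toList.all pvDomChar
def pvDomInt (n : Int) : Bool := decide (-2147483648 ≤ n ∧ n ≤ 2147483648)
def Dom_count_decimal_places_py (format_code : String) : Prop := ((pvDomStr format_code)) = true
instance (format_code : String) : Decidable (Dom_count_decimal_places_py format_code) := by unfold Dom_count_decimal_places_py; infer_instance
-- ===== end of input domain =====

-- B replaces A's skip-then-count loop state machine by masking non-placeholders to spaces,
-- whitespace-splitting, and taking the length of the first token (objective: idiomatic, not faster).

-- ===== PORT A =====
-- `char in {"0", "#"}` (a one-char membership test; exact)
def pvIsPh (c : Char) : Bool := c == '0' || c == '#'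

-- format_code.split(".", 1)[1]; the [1] is used only when "." is in format_code, so two pieces exist
def pvPart (format_code : String) : String :=
  (PySem.List.pyGet? ((PySem.Str.splitMax? format_code "." 1).getD []) 1).getD ""

-- A's for-loop with `continue`/`break`, state (decimals, started)
def pvALoop : List Char → Int → Bool → Int
  | [], d, _ => d
  | c :: cs, d, started =>
    if pvIsPh c then pvALoop cs (d + 1) true
    else if started then d
    else pvALoop cs d started

def count_decimal_places_py (format_code : String) : Option Int :=
  if PySem.Str.isIn "." format_code = false then
    (if PySem.Str.isIn "0" format_code then some 0 else none)
  else
    some (pvALoop (pvPart format_code).toList 0 false)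

-- ===== PORT B =====
-- `c if c in "0#" else " "` (one-char membership; exact)
def pvMask (c : Char) : Char := if c == '0' || c == '#' then c else ' '

def count_decimal_places_py_alt (format_code : String) : Option Int :=
  if PySem.Str.isIn "." format_code = false then
    (if PySem.Str.isIn "0" format_code then some 0 else none)
  else
    -- runs = "".join(c if c in "0#" else " " for c in part).split()
    match PySem.Str.split₀ (String.ofList ((pvPart format_code).toList.map pvMask)) with
    | [] => some 0
    | t :: _ => some (PySem.Str.len t)

-- ===== PRECONDITION & SPEC =====
def Spec_count_decimal_places_py (format_code : String) (out : Option Int) : Prop := out = count_decimal_places_py_alt format_code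
instance (format_code : String) (out : Option Int) : Decidable (Spec_count_decimal_places_py format_code out) := by unfold Spec_count_decimal_places_py; infer_instance

-- ===== CLAIM (what is proved, stated in full; the proofs are below) =====
def Claim_equal_count_decimal_places_py : Prop := ∀ (format_code : String), Dom_count_decimal_places_py format_code → Spec_count_decimal_places_py format_code (count_decimal_places_py format_code)

-- ===== LEMMAS AND PROOFS =====

-- Once started, A's loop adds the length of the leading placeholder run and stops.
theorem pvALoop_true (cs : List Char) (d : Int) :
    pvALoop cs d true = d + (cs.takeWhile pvIsPh).length := by
  induction cs generalizing d with
  | nil => simp [pvALoop]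
  | cons c cs ih =>
    by_cases h : pvIsPh c = true
    · simp [pvALoop, h, ih]; omega
    · simp [pvALoop, h]

-- A's loop computes the length of the first maximal placeholder run.
theorem pvALoop_false (cs : List Char) :
    pvALoop cs 0 false =
      (((cs.dropWhile (fun c => !pvIsPh c)).takeWhile pvIsPh).length : Int) := by
  induction cs with
  | nil => simp [pvALoop]
  | cons c cs ih =>
    by_cases h : pvIsPh c = true
    · simp [pvALoop, h, pvALoop_true]
      omega
    · simp [pvALoop, h, ih]

-- split₀.go with a nonempty accumulator: the head of the final result is the first stored token.
theorem pvGo_acc (l : List Char) (cur : List Char) (as : List (List Char)) (t : List Char) :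
    ∃ rs, PySem.Chars.split₀.go l cur (as ++ [t]) = t :: rs := by
  induction l generalizing cur as with
  | nil =>
    by_cases h : cur.isEmpty = true
    · exact ⟨as.reverse, by simp [PySem.Chars.split₀.go, h]⟩
    · exact ⟨as.reverse ++ [cur.reverse], by simp [PySem.Chars.split₀.go, h]⟩
  | cons c l ih =>
    by_cases hs : PySem.Chars.isspace c = true
    · by_cases h : cur.isEmpty = true
      · obtain ⟨rs, hrs⟩ := ih [] as
        exact ⟨rs, by simp [PySem.Chars.split₀.go, hs, h, hrs]⟩
      · obtain ⟨rs, hrs⟩ := ih [] (cur.reverse :: as)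
        exact ⟨rs, by simpa [PySem.Chars.split₀.go, hs, h] using hrs⟩
    · obtain ⟨rs, hrs⟩ := ih (c :: cur) as
      exact ⟨rs, by simp [PySem.Chars.split₀.go, hs, hrs]⟩

-- split₀.go mid-token: the first token is cur.reverse ++ the rest of the current run.
theorem pvGo_main (l : List Char) (cur : List Char) (hcur : cur ≠ []) :
    ∃ rs, PySem.Chars.split₀.go l cur [] =
      (cur.reverse ++ l.takeWhile (fun c => !PySem.Chars.isspace c)) :: rs := by
  induction l generalizing cur with
  | nil =>
    refine ⟨[], ?_⟩
    simp [PySem.Chars.split₀.go, List.isEmpty_iff, hcur]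
  | cons c l ih =>
    by_cases hs : PySem.Chars.isspace c = true
    · obtain ⟨rs, hrs⟩ := pvGo_acc l [] [] cur.reverse
      refine ⟨rs, ?_⟩
      simp [PySem.Chars.split₀.go, hs, List.isEmpty_iff, hcur]
      simpa using hrs
    · obtain ⟨rs, hrs⟩ := ih (c :: cur) (by simp)
      refine ⟨rs, ?_⟩
      simp [PySem.Chars.split₀.go, hs, hrs]

-- The first token of s.split() is the first maximal non-space run.
theorem pvSplit₀_first (l : List Char) :
    (match PySem.Chars.split₀ l with | [] => 0 | t :: _ => t.length) =
      ((l.dropWhile PySem.Chars.isspace).takeWhile (fun c => !PySem.Chars.isspace c)).length := by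
  induction l with
  | nil => simp [PySem.Chars.split₀, PySem.Chars.split₀.go]
  | cons c l ih =>
    by_cases hs : PySem.Chars.isspace c = true
    · simpa [PySem.Chars.split₀, PySem.Chars.split₀.go, hs, List.dropWhile_cons] using ih
    · obtain ⟨rs, hrs⟩ := pvGo_main l [c] (by simp)
      simp [PySem.Chars.split₀, PySem.Chars.split₀.go, hs, hrs]

theorem pvIsspace_mask (c : Char) : PySem.Chars.isspace (pvMask c) = !pvIsPh c := by
  by_cases h : pvIsPh c = true
  · rcases Bool.or_eq_true_iff.mp h with h0 | h0 <;>
      simp_all [pvMask, pvIsPh, PySem.Chars.isspace]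
  · simp [pvIsPh] at h
    simp [pvMask, h, pvIsPh, PySem.Chars.isspace]

-- ===== VERDICT (by name: the statement is the Claim_ definition above) =====
theorem count_decimal_places_py_spec : Claim_equal_count_decimal_places_py := by
  intro fc _
  show count_decimal_places_py fc = count_decimal_places_py_alt fc
  unfold count_decimal_places_py count_decimal_places_py_alt
  split_ifs with h h0
  · rfl
  · rfl
  · have hfun1 : (fun c => PySem.Chars.isspace (pvMask c)) = (fun c => !pvIsPh c) := by
      funext c; exact pvIsspace_mask c
    have hfun2 : (fun c => !PySem.Chars.isspace (pvMask c)) = pvIsPh := by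
      funext c; simp [pvIsspace_mask c]
    have hB := pvSplit₀_first ((pvPart fc).toList.map pvMask)
    rw [List.dropWhile_map, List.takeWhile_map, List.length_map,
      Function.comp_def, Function.comp_def, hfun1, hfun2] at hB
    rw [pvALoop_false]
    simp only [PySem.Str.split₀, String.toList_ofList]
    rcases hsp : PySem.Chars.split₀ ((pvPart fc).toList.map pvMask) with _ | ⟨t, ts⟩
    · rw [hsp] at hB
      simp at hB
      simp [hB]
    · rw [hsp] at hB
      simp only [List.map_cons]
      simp only at hB
      simp [PySem.Str.len, hB]
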